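-- pv_equiv track=rewrite | github.com/m0dd0/CartographRL | carthographRL/game/view/pg_view.py | _transform_shape_coords
-- ===== SOURCE A (Python) =====
-- from typing import Tuple, List, FrozenSet, Dict, Any, Union
--
-- def _transform_shape_coords(
--     shape_coords: FrozenSet[Tuple[int, int]], mirror: bool, rotation: int
-- ) -> FrozenSet[Tuple[int, int]]:
--     """Transforms the shape coordinates depending on the current state of the option.
--     I.e. rotates and mirrors the shape coordinates to obtain the coorindates to display.
--     Tge shape_coord attribute is not changed.
--
--     Args:
--         shape_coords (FrozenSet[Tuple[int, int]]): Original coordinates of the option shape.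
--         mirror (bool): Whether the option is mirrored.
--         rotation (int): Rotation of the option.
--
--     Returns:
--         FrozenSet[Tuple[int, int]]: Transformed coordinates of the option shape.
--     """
--     if mirror:
--         shape_coords = {(-x, y) for x, y in shape_coords}
--
--     if rotation == 0:
--         shape_coords = shape_coords
--     elif rotation == 1:
--         shape_coords = {(y, -x) for x, y in shape_coords}
--     elif rotation == 2:
--         shape_coords = {(-x, -y) for x, y in shape_coords}
--     elif rotation == 3:
--         shape_coords = {(-y, x) for x, y in shape_coords}
--     else:
--         raise ValueError(f"Invalid rotation: {rotation}")
--
--     min_x = min(x for x, _ in shape_coords)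
--     min_y = min(y for _, y in shape_coords)
--     shape_coords = {(x - min_x, y - min_y) for x, y in shape_coords}
--
--     return shape_coords
-- ===== SOURCE B (Python) =====
-- def _transform_shape_coords(shape_coords, mirror, rotation):
--     # Single pass: place each point individually (flip x if mirrored, then apply
--     # `rotation` quarter-turns one at a time), collecting the placed points and
--     # the running minima together; then shift once at the end.
--     if rotation not in (0, 1, 2, 3):
--         raise ValueError(f"Invalid rotation: {rotation}")
--     pts = set()
--     min_x = min_y = None
--     for x, y in shape_coords:
--         if mirror:
--             x = -x
--         for _ in range(rotation):
--             x, y = y, -x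
--         pts.add((x, y))
--         if min_x is None or x < min_x:
--             min_x = x
--         if min_y is None or y < min_y:
--             min_y = y
--     return {(x - min_x, y - min_y) for x, y in pts}
-- ===== Notes on version B (the rewrite author's own statement) =====
-- stated objective: alternative
-- what changed: Replaces A's five staged set comprehensions (mirror pass, four-branch rotation pass, two min() generator passes, shift pass) with a single loop that places each point individually -- flipping x if mirrored and applying the rotation as iterated quarter-turns -- while accumulating the set and the running minima in the same pass, followed by one shift comprehension.
import Mathlib
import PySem

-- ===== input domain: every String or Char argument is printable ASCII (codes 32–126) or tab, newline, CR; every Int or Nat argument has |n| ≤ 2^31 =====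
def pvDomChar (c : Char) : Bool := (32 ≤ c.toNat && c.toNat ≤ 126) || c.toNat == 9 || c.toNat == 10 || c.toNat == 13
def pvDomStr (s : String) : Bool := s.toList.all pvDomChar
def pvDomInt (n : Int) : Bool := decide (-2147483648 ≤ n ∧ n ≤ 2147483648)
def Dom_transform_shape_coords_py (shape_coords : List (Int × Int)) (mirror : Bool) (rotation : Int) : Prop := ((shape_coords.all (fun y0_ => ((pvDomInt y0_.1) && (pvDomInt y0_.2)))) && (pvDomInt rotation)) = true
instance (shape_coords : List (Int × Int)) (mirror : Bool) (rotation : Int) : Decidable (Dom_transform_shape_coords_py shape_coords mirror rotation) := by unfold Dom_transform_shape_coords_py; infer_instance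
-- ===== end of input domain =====

-- B replaces A's staged comprehensions (mirror pass, four-branch rotation pass, two min
-- passes, shift pass) by one loop that places each point via iterated quarter-turns and
-- accumulates the running minima alongside, then shifts once.


-- ===== PORT A =====
def transform_shape_coords_py (shape_coords : List (Int × Int)) (mirror : Bool) (rotation : Int) : List (Int × Int) :=
  let s1 := if mirror then PySem.Set.ofList (shape_coords.map (fun p => (-p.1, p.2))) else shape_coords
  let s2 :=
    if rotation = 0 then s1
    else if rotation = 1 then PySem.Set.ofList (s1.map (fun p => (p.2, -p.1)))
    else if rotation = 2 then PySem.Set.ofList (s1.map (fun p => (-p.1, -p.2)))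
    else if rotation = 3 then PySem.Set.ofList (s1.map (fun p => (-p.2, p.1)))
    else []  -- raise ValueError: excluded by Pre_
  let min_x := (PySem.List.min? (s2.map (fun p => p.1)) (fun x => x)).getD 0  -- none = ValueError on empty set, excluded by Pre_
  let min_y := (PySem.List.min? (s2.map (fun p => p.2)) (fun x => x)).getD 0
  PySem.Set.ofList (s2.map (fun p => (p.1 - min_x, p.2 - min_y)))

-- ===== PORT B =====
-- the body of Source B's loop (helper)
def pvPortStep (mirror : Bool) (rotation : Int) (st : PySem.Set (Int × Int) × Option Int × Option Int) (p : Int × Int) : PySem.Set (Int × Int) × Option Int × Option Int :=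
  let x := if mirror then -p.1 else p.1
  let t := (PySem.List.pyRange 0 rotation 1).foldl (fun (q : Int × Int) _ => (q.2, -q.1)) (x, p.2)
  (PySem.Set.add st.1 t,
   some (match st.2.1 with | none => t.1 | some m => if t.1 < m then t.1 else m),
   some (match st.2.2 with | none => t.2 | some m => if t.2 < m then t.2 else m))

def transform_shape_coords_py_alt (shape_coords : List (Int × Int)) (mirror : Bool) (rotation : Int) : List (Int × Int) :=
  if ¬ (rotation = 0 ∨ rotation = 1 ∨ rotation = 2 ∨ rotation = 3) then []  -- raise ValueError: excluded by Pre_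
  else
    let st := shape_coords.foldl (pvPortStep mirror rotation) (PySem.Set.empty, none, none)
    PySem.Set.ofList (st.1.map (fun p => (p.1 - st.2.1.getD 0, p.2 - st.2.2.getD 0)))

-- ===== PRECONDITION & SPEC =====
-- Pre_ excludes the inputs where A raises ValueError (empty coordinate set: min() of an
-- empty generator; rotation outside {0,1,2,3}); Nodup states that the list encodes a
-- frozenset (distinct elements), which is intrinsic to A's parameter type.
def Pre_transform_shape_coords_py (shape_coords : List (Int × Int)) (mirror : Bool) (rotation : Int) : Prop :=
  shape_coords ≠ [] ∧ shape_coords.Nodup ∧ (rotation = 0 ∨ rotation = 1 ∨ rotation = 2 ∨ rotation = 3)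
instance (shape_coords : List (Int × Int)) (mirror : Bool) (rotation : Int) : Decidable (Pre_transform_shape_coords_py shape_coords mirror rotation) := by unfold Pre_transform_shape_coords_py; infer_instance

def pvWitness_transform_shape_coords_py : (List (Int × Int)) × Bool × Int := ([(0, 0), (1, 0), (1, 1)], true, 1)

def Spec_transform_shape_coords_py (shape_coords : List (Int × Int)) (mirror : Bool) (rotation : Int) (out : List (Int × Int)) : Prop := out = transform_shape_coords_py_alt shape_coords mirror rotation
instance (shape_coords : List (Int × Int)) (mirror : Bool) (rotation : Int) (out : List (Int × Int)) : Decidable (Spec_transform_shape_coords_py shape_coords mirror rotation out) := by unfold Spec_transform_shape_coords_py; infer_instance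

-- ===== CLAIM (what is proved, stated in full; the proofs are below) =====
def Claim_equal_transform_shape_coords_py : Prop := ∀ (shape_coords : List (Int × Int)) (mirror : Bool) (rotation : Int), Dom_transform_shape_coords_py shape_coords mirror rotation → Pre_transform_shape_coords_py shape_coords mirror rotation → Spec_transform_shape_coords_py shape_coords mirror rotation (transform_shape_coords_py shape_coords mirror rotation)
-- ===== LEMMAS AND PROOFS =====

-- B's loop body with the placement map abstracted out.
def pvStep (f : Int × Int → Int × Int) (st : PySem.Set (Int × Int) × Option Int × Option Int) (p : Int × Int) : PySem.Set (Int × Int) × Option Int × Option Int :=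
  (PySem.Set.add st.1 (f p),
   some (match st.2.1 with | none => (f p).1 | some m => if (f p).1 < m then (f p).1 else m),
   some (match st.2.2 with | none => (f p).2 | some m => if (f p).2 < m then (f p).2 else m))

theorem pv_if_min (c m : Int) : (if c < m then c else m) = min m c := by omega

theorem pv_fold_some (f : Int × Int → Int × Int) (l : List (Int × Int)) (s : PySem.Set (Int × Int)) (mx my : Int) :
    l.foldl (pvStep f) (s, some mx, some my)
    = (l.foldl (fun s p => PySem.Set.add s (f p)) s,
       some (l.foldl (fun m p => min m (f p).1) mx),
       some (l.foldl (fun m p => min m (f p).2) my)) := by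
  induction l generalizing s mx my with
  | nil => rfl
  | cons p t ih => simp [pvStep, ih, pv_if_min]

-- The x-flip and quarter-turns are injective, so a duplicate-free list stays duplicate-free.
theorem pv_ofList_map {f : Int × Int → Int × Int} (hf : Function.Injective f)
    {l : List (Int × Int)} (hl : l.Nodup) :
    PySem.Set.ofList (l.map f) = l.map f :=
  PySem.Set.ofList_eq_self_of_nodup _ (hl.map hf)

-- B's whole body, for an abstract injective placement map f on a nonempty nodup list,
-- equals A's shape computed from s2 = l.map f.
theorem pv_B_eq (f : Int × Int → Int × Int) (hf : Function.Injective f)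
    (p : Int × Int) (t : List (Int × Int)) (hnd : (p :: t).Nodup) :
    (let st := (p :: t).foldl (pvStep f) (PySem.Set.empty, none, none);
     PySem.Set.ofList (st.1.map (fun q => (q.1 - st.2.1.getD 0, q.2 - st.2.2.getD 0))))
    = (let s2 := (p :: t).map f;
       let mx := (PySem.List.min? (s2.map (fun q => q.1)) (fun x => x)).getD 0;
       let my := (PySem.List.min? (s2.map (fun q => q.2)) (fun x => x)).getD 0;
       PySem.Set.ofList (s2.map (fun q => (q.1 - mx, q.2 - my)))) := by
  have hset : List.foldl (fun s q => PySem.Set.add s (f q)) [f p] t = (p :: t).map f := by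
    have h2 : PySem.Set.ofList ((p :: t).map f) = (p :: t).map f := pv_ofList_map hf hnd
    rw [PySem.Set.ofList_eq_foldl] at h2
    simpa [List.foldl_map, PySem.Set.add] using h2
  simp only [List.foldl_cons, pvStep, pv_fold_some]
  simp only [show PySem.Set.add PySem.Set.empty (f p) = [f p] from rfl]
  rw [hset]
  simp [PySem.List.min?_id_cons, List.foldl_map, List.map_map, Function.comp_def]

-- ===== VERDICT (by name: the statement is the Claim_ definition above) =====
theorem transform_shape_coords_py_spec : Claim_equal_transform_shape_coords_py := by
  intro l mirror rotation _ hpre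
  obtain ⟨hne, hnd, hrot⟩ := hpre
  obtain ⟨p, t, rfl⟩ := List.exists_cons_of_ne_nil hne
  unfold Spec_transform_shape_coords_py transform_shape_coords_py transform_shape_coords_py_alt
  rcases hrot with h | h | h | h <;> subst h <;> cases mirror
  · have e1 : pvPortStep false 0 = pvStep (fun q : Int × Int => q) := by
      funext st q
      simp [pvPortStep, pvStep, show PySem.List.pyRange 0 0 1 = ([] : List Int) from by decide]
    have hinj : Function.Injective (fun q : Int × Int => q) := by
      intro u v h; simp [Prod.ext_iff] at h ⊢; omega
    rw [if_neg (show ¬¬((0 : Int) = 0 ∨ (0 : Int) = 1 ∨ (0 : Int) = 2 ∨ (0 : Int) = 3) from by decide)]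
    simp only [e1]
    rw [pv_B_eq _ hinj p t hnd]
    simp [PySem.List.min?_id_cons, List.foldl_map]
  · have e1 : pvPortStep true 0 = pvStep (fun q : Int × Int => (-q.1, q.2)) := by
      funext st q
      simp [pvPortStep, pvStep, show PySem.List.pyRange 0 0 1 = ([] : List Int) from by decide]
    have hinj : Function.Injective (fun q : Int × Int => (-q.1, q.2)) := by
      intro u v h; simp [Prod.ext_iff] at h ⊢; omega
    rw [if_neg (show ¬¬((0 : Int) = 0 ∨ (0 : Int) = 1 ∨ (0 : Int) = 2 ∨ (0 : Int) = 3) from by decide)]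
    simp only [e1]
    rw [pv_B_eq _ hinj p t hnd]
    have hA : PySem.Set.ofList ((fun q : Int × Int => (-q.1, q.2)) p :: t.map (fun q : Int × Int => (-q.1, q.2))) = (fun q : Int × Int => (-q.1, q.2)) p :: t.map (fun q : Int × Int => (-q.1, q.2)) := by
      simpa using pv_ofList_map hinj hnd
    simp [hA, List.map_map, Function.comp_def, PySem.List.min?_id_cons, List.foldl_map]
  · have e1 : pvPortStep false 1 = pvStep (fun q : Int × Int => (q.2, -q.1)) := by
      funext st q
      simp [pvPortStep, pvStep, show PySem.List.pyRange 0 1 1 = [(0:Int)] from by decide]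
    have hinj : Function.Injective (fun q : Int × Int => (q.2, -q.1)) := by
      intro u v h; simp [Prod.ext_iff] at h ⊢; omega
    rw [if_neg (show ¬¬((1 : Int) = 0 ∨ (1 : Int) = 1 ∨ (1 : Int) = 2 ∨ (1 : Int) = 3) from by decide)]
    simp only [e1]
    rw [pv_B_eq _ hinj p t hnd]
    have hA : PySem.Set.ofList ((fun q : Int × Int => (q.2, -q.1)) p :: t.map (fun q : Int × Int => (q.2, -q.1))) = (fun q : Int × Int => (q.2, -q.1)) p :: t.map (fun q : Int × Int => (q.2, -q.1)) := by
      simpa using pv_ofList_map hinj hnd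
    simp [hA, List.map_map, Function.comp_def, PySem.List.min?_id_cons, List.foldl_map]
  · have e1 : pvPortStep true 1 = pvStep (fun q : Int × Int => (q.2, q.1)) := by
      funext st q
      simp [pvPortStep, pvStep, show PySem.List.pyRange 0 1 1 = [(0:Int)] from by decide]
    have hinj : Function.Injective (fun q : Int × Int => (q.2, q.1)) := by
      intro u v h; simp [Prod.ext_iff] at h ⊢; omega
    rw [if_neg (show ¬¬((1 : Int) = 0 ∨ (1 : Int) = 1 ∨ (1 : Int) = 2 ∨ (1 : Int) = 3) from by decide)]
    simp only [e1]
    rw [pv_B_eq _ hinj p t hnd]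
    have hA : PySem.Set.ofList ((fun q : Int × Int => (q.2, q.1)) p :: t.map (fun q : Int × Int => (q.2, q.1))) = (fun q : Int × Int => (q.2, q.1)) p :: t.map (fun q : Int × Int => (q.2, q.1)) := by
      simpa using pv_ofList_map hinj hnd
    have hg : Function.Injective (fun q : Int × Int => (-q.1, q.2)) := by
      intro u v h; simp [Prod.ext_iff] at h ⊢; omega
    have hAg : PySem.Set.ofList ((fun q : Int × Int => (-q.1, q.2)) p :: t.map (fun q : Int × Int => (-q.1, q.2))) = (fun q : Int × Int => (-q.1, q.2)) p :: t.map (fun q : Int × Int => (-q.1, q.2)) := by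
      simpa using pv_ofList_map hg hnd
    simp [hA, hAg, List.map_map, Function.comp_def, PySem.List.min?_id_cons, List.foldl_map]
  · have e1 : pvPortStep false 2 = pvStep (fun q : Int × Int => (-q.1, -q.2)) := by
      funext st q
      simp [pvPortStep, pvStep, show PySem.List.pyRange 0 2 1 = [(0:Int), 1] from by decide]
    have hinj : Function.Injective (fun q : Int × Int => (-q.1, -q.2)) := by
      intro u v h; simp [Prod.ext_iff] at h ⊢; omega
    rw [if_neg (show ¬¬((2 : Int) = 0 ∨ (2 : Int) = 1 ∨ (2 : Int) = 2 ∨ (2 : Int) = 3) from by decide)]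
    simp only [e1]
    rw [pv_B_eq _ hinj p t hnd]
    have hA : PySem.Set.ofList ((fun q : Int × Int => (-q.1, -q.2)) p :: t.map (fun q : Int × Int => (-q.1, -q.2))) = (fun q : Int × Int => (-q.1, -q.2)) p :: t.map (fun q : Int × Int => (-q.1, -q.2)) := by
      simpa using pv_ofList_map hinj hnd
    simp [hA, List.map_map, Function.comp_def, PySem.List.min?_id_cons, List.foldl_map]
  · have e1 : pvPortStep true 2 = pvStep (fun q : Int × Int => (q.1, -q.2)) := by
      funext st q
      simp [pvPortStep, pvStep, show PySem.List.pyRange 0 2 1 = [(0:Int), 1] from by decide]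
    have hinj : Function.Injective (fun q : Int × Int => (q.1, -q.2)) := by
      intro u v h; simp [Prod.ext_iff] at h ⊢; omega
    rw [if_neg (show ¬¬((2 : Int) = 0 ∨ (2 : Int) = 1 ∨ (2 : Int) = 2 ∨ (2 : Int) = 3) from by decide)]
    simp only [e1]
    rw [pv_B_eq _ hinj p t hnd]
    have hA : PySem.Set.ofList ((fun q : Int × Int => (q.1, -q.2)) p :: t.map (fun q : Int × Int => (q.1, -q.2))) = (fun q : Int × Int => (q.1, -q.2)) p :: t.map (fun q : Int × Int => (q.1, -q.2)) := by
      simpa using pv_ofList_map hinj hnd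
    have hg : Function.Injective (fun q : Int × Int => (-q.1, q.2)) := by
      intro u v h; simp [Prod.ext_iff] at h ⊢; omega
    have hAg : PySem.Set.ofList ((fun q : Int × Int => (-q.1, q.2)) p :: t.map (fun q : Int × Int => (-q.1, q.2))) = (fun q : Int × Int => (-q.1, q.2)) p :: t.map (fun q : Int × Int => (-q.1, q.2)) := by
      simpa using pv_ofList_map hg hnd
    simp [hA, hAg, List.map_map, Function.comp_def, PySem.List.min?_id_cons, List.foldl_map]
  · have e1 : pvPortStep false 3 = pvStep (fun q : Int × Int => (-q.2, q.1)) := by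
      funext st q
      simp [pvPortStep, pvStep, show PySem.List.pyRange 0 3 1 = [(0:Int), 1, 2] from by decide]
    have hinj : Function.Injective (fun q : Int × Int => (-q.2, q.1)) := by
      intro u v h; simp [Prod.ext_iff] at h ⊢; omega
    rw [if_neg (show ¬¬((3 : Int) = 0 ∨ (3 : Int) = 1 ∨ (3 : Int) = 2 ∨ (3 : Int) = 3) from by decide)]
    simp only [e1]
    rw [pv_B_eq _ hinj p t hnd]
    have hA : PySem.Set.ofList ((fun q : Int × Int => (-q.2, q.1)) p :: t.map (fun q : Int × Int => (-q.2, q.1))) = (fun q : Int × Int => (-q.2, q.1)) p :: t.map (fun q : Int × Int => (-q.2, q.1)) := by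
      simpa using pv_ofList_map hinj hnd
    simp [hA, List.map_map, Function.comp_def, PySem.List.min?_id_cons, List.foldl_map]
  · have e1 : pvPortStep true 3 = pvStep (fun q : Int × Int => (-q.2, -q.1)) := by
      funext st q
      simp [pvPortStep, pvStep, show PySem.List.pyRange 0 3 1 = [(0:Int), 1, 2] from by decide]
    have hinj : Function.Injective (fun q : Int × Int => (-q.2, -q.1)) := by
      intro u v h; simp [Prod.ext_iff] at h ⊢; omega
    rw [if_neg (show ¬¬((3 : Int) = 0 ∨ (3 : Int) = 1 ∨ (3 : Int) = 2 ∨ (3 : Int) = 3) from by decide)]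
    simp only [e1]
    rw [pv_B_eq _ hinj p t hnd]
    have hA : PySem.Set.ofList ((fun q : Int × Int => (-q.2, -q.1)) p :: t.map (fun q : Int × Int => (-q.2, -q.1))) = (fun q : Int × Int => (-q.2, -q.1)) p :: t.map (fun q : Int × Int => (-q.2, -q.1)) := by
      simpa using pv_ofList_map hinj hnd
    have hg : Function.Injective (fun q : Int × Int => (-q.1, q.2)) := by
      intro u v h; simp [Prod.ext_iff] at h ⊢; omega
    have hAg : PySem.Set.ofList ((fun q : Int × Int => (-q.1, q.2)) p :: t.map (fun q : Int × Int => (-q.1, q.2))) = (fun q : Int × Int => (-q.1, q.2)) p :: t.map (fun q : Int × Int => (-q.1, q.2)) := by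
      simpa using pv_ofList_map hg hnd
    simp [hA, hAg, List.map_map, Function.comp_def, PySem.List.min?_id_cons, List.foldl_map]
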